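-- pv_equiv track=rewrite | github.com/Khushi-Dixit/Problem-Solving | hard_consonants.py | Difficulty
-- ===== SOURCE A (Python) =====
-- def Difficulty(str):
--     if not str:
--         return 0
--
--     vowels = {'a', 'e', 'i', 'o', 'u'}
--     hard_count = 0
--     easy_count = 0
--
--     words = str.split()
--
--     for word in words:
--         consonants = 0
--         vowels_count = 0
--         consecutive_consonants = 0
--         is_hard_word = False
--
--         for ch in word:
--             if ch in vowels:
--                 vowels_count += 1
--                 consecutive_consonants = 0
--             else:
--                 consonants += 1
--                 consecutive_consonants += 1
--                 if consecutive_consonants == 3: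
--                     is_hard_word = True
--                     break
--
--         # Determine if the word is hard or easy
--         if is_hard_word or consonants > vowels_count:
--             hard_count += 1
--         else:
--             easy_count += 1
--
--     # Calculate the difficulty quotient
--     difficulty_quotient = (5 * hard_count) - (2 * easy_count)
--     return difficulty_quotient
-- ===== SOURCE B (Python) =====
-- def Difficulty(str):
--     vowels = set('aeiou')
--     score = 0
--     for w in str.split():
--         v = sum(ch in vowels for ch in w)
--         hard = len(w) - v > v or any(
--             a not in vowels and b not in vowels and c not in vowels
--             for a, b, c in zip(w, w[1:], w[2:]))
--         score += 5 if hard else -2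
--     return score
-- ===== Notes on version B (the rewrite author's own statement) =====
-- stated objective: simpler
-- what changed: Replaces A's stateful per-word loop (consecutive-consonant counter with early break and mutable flags) by per-word declarative expressions: a vowel-count sum, a consonant-majority comparison, and a 3-consonant-run test via any over zip(w, w[1:], w[2:]); the score is a single fold instead of separate hard/easy counters.
import Mathlib
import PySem

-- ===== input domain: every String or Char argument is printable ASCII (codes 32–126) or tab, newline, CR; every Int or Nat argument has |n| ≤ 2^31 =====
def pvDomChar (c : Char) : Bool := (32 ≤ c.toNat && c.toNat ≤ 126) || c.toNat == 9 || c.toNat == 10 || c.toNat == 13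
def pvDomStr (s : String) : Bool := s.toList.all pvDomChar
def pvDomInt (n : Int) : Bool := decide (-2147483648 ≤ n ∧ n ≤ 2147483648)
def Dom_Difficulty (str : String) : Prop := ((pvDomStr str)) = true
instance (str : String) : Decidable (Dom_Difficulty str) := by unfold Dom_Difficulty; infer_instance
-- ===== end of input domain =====

-- B replaces A's stateful early-breaking per-word loop by declarative per-word expressions
-- (vowel-count sum, consonant-majority test, 3-consonant-run test via any over zip(w,w[1:],w[2:]))
-- folded into one score accumulator; objective: simpler.

-- ===== PORT A =====
def pvVowelsA : List Char := ['a', 'e', 'i', 'o', 'u']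

-- A's inner 'for ch in word' loop: state (consonants, vowels_count, consecutive_consonants);
-- the Bool result is is_hard_word (true exactly when the loop broke at 3 consecutive consonants).
def pvWordLoopA : List Char → Int → Int → Int → Int × Int × Bool
  | [], cons, vow, _ => (cons, vow, false)
  | ch :: rest, cons, vow, run =>
    if ch ∈ pvVowelsA then pvWordLoopA rest cons (vow + 1) 0
    else
      if run + 1 == 3 then (cons + 1, vow, true)
      else pvWordLoopA rest (cons + 1) vow (run + 1)

-- A's outer per-word step on (hard_count, easy_count)
def pvStepA (he : Int × Int) (w : String) : Int × Int :=
  let r := pvWordLoopA w.toList 0 0 0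
  if r.2.2 || decide (r.1 > r.2.1) then (he.1 + 1, he.2) else (he.1, he.2 + 1)

def Difficulty (str : String) : Int :=
  if str.toList.isEmpty then 0
  else
    let he := (PySem.Str.split₀ str).foldl pvStepA (0, 0)
    5 * he.1 - 2 * he.2

-- ===== PORT B =====
def pvVowelsB : List Char := PySem.Set.ofList "aeiou".toList   -- set('aeiou')

-- B's per-word step on the running score
def pvStepB (score : Int) (w : String) : Int :=
  let cs := w.toList
  let v : Int := (cs.map (fun ch => if ch ∈ pvVowelsB then (1 : Int) else 0)).sum
  let hard := decide ((PySem.Str.len w : Int) - v > v) ||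
    (cs.zip ((PySem.List.slice cs (some 1) none).zip (PySem.List.slice cs (some 2) none))).any
      (fun t => !decide (t.1 ∈ pvVowelsB) && !decide (t.2.1 ∈ pvVowelsB) && !decide (t.2.2 ∈ pvVowelsB))
  score + (if hard then 5 else -2)

def Difficulty_alt (str : String) : Int :=
  (PySem.Str.split₀ str).foldl pvStepB 0

-- ===== PRECONDITION & SPEC =====
def Spec_Difficulty (str : String) (out : Int) : Prop := out = Difficulty_alt str
instance (str : String) (out : Int) : Decidable (Spec_Difficulty str out) := by unfold Spec_Difficulty; infer_instance

-- ===== CLAIM (what is proved, stated in full; the proofs are below) =====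
def Claim_equal_Difficulty : Prop := ∀ (str : String), Dom_Difficulty str → Spec_Difficulty str (Difficulty str)

-- ===== LEMMAS AND PROOFS =====

def pvVow (ch : Char) : Bool := decide (ch ∈ pvVowelsA)

-- the decision A's run counter makes, isolated from the count state
def pvRun3 : List Char → Int → Bool
  | [], _ => false
  | ch :: rest, run =>
    if pvVow ch then pvRun3 rest 0
    else if run + 1 == 3 then true else pvRun3 rest (run + 1)

-- B's run test, on drop-form zips
def pvZ3 (cs : List Char) : Bool :=
  (cs.zip ((cs.drop 1).zip (cs.drop 2))).any
    (fun t => !pvVow t.1 && !pvVow t.2.1 && !pvVow t.2.2)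

def pvOk1 : List Char → Bool
  | a :: _ => !pvVow a
  | _ => false

def pvOk2 : List Char → Bool
  | a :: b :: _ => !pvVow a && !pvVow b
  | _ => false

theorem pvZ3_cons (c : Char) (t : List Char) :
    pvZ3 (c :: t) = ((!pvVow c && pvOk2 t) || pvZ3 t) := by
  rcases t with _ | ⟨a, t⟩
  · simp [pvZ3, pvOk2]
  · rcases t with _ | ⟨b, t⟩
    · simp [pvZ3, pvOk2]
    · simp [pvZ3, pvOk2, Bool.and_assoc]

theorem pvOk2_cons (c : Char) (t : List Char) :
    pvOk2 (c :: t) = (!pvVow c && pvOk1 t) := by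
  rcases t with _ | ⟨a, t⟩ <;> simp [pvOk1, pvOk2]

theorem pvOk2_of_ok1_false {t : List Char} (h : pvOk1 t = false) : pvOk2 t = false := by
  rcases t with _ | ⟨a, t⟩
  · rfl
  · rcases t with _ | ⟨b, t⟩
    · rfl
    · simp [pvOk1] at h
      simp [pvOk2, h]

theorem pvRun3_eq (cs : List Char) :
    pvRun3 cs 2 = (pvOk1 cs || pvZ3 cs) ∧
    pvRun3 cs 1 = (pvOk2 cs || pvZ3 cs) ∧
    pvRun3 cs 0 = pvZ3 cs := by
  induction cs with
  | nil => simp [pvRun3, pvZ3, pvOk1, pvOk2]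
  | cons c t ih =>
    obtain ⟨ih2, ih1, ih0⟩ := ih
    have hz := pvZ3_cons c t
    have ho := pvOk2_cons c t
    cases hc : pvVow c
    · refine ⟨?_, ?_, ?_⟩
      · have h : pvRun3 (c :: t) 2 = true := by simp [pvRun3, hc]
        rw [h]
        simp [pvOk1, hc]
      · have h : pvRun3 (c :: t) 1 = pvRun3 t 2 := by simp [pvRun3, hc]
        rw [h, ih2, ho, hz, hc]
        cases h1 : pvOk1 t
        · simp [pvOk2_of_ok1_false h1]
        · simp
      · have h : pvRun3 (c :: t) 0 = pvRun3 t 1 := by simp [pvRun3, hc]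
        rw [h, ih1, hz, hc]
        simp
    · refine ⟨?_, ?_, ?_⟩
      · have h : pvRun3 (c :: t) 2 = pvRun3 t 0 := by simp [pvRun3, hc]
        rw [h, ih0, hz, hc]
        simp [pvOk1, hc]
      · have h : pvRun3 (c :: t) 1 = pvRun3 t 0 := by simp [pvRun3, hc]
        rw [h, ih0, hz, ho, hc]
        simp
      · have h : pvRun3 (c :: t) 0 = pvRun3 t 0 := by simp [pvRun3, hc]
        rw [h, ih0, hz, hc]
        simp

theorem pvWordLoopA_char (cs : List Char) : ∀ (c v r : Int),
    (pvWordLoopA cs c v r).2.2 = pvRun3 cs r ∧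
    (pvRun3 cs r = false →
      pvWordLoopA cs c v r =
        (c + (cs.countP (fun ch => !pvVow ch) : Int), v + (cs.countP pvVow : Int), false)) := by
  induction cs with
  | nil => intro c v r; simp [pvWordLoopA, pvRun3]
  | cons ch rest ih =>
    intro c v r
    by_cases hv : ch ∈ pvVowelsA
    · have hb : pvVow ch = true := by simp [pvVow, hv]
      constructor
      · simp only [pvWordLoopA, pvRun3, hv, hb, if_true]
        exact (ih c (v + 1) 0).1
      · intro h0
        simp only [pvRun3, hb, if_true] at h0
        simp only [pvWordLoopA, hv, if_true]
        rw [(ih c (v + 1) 0).2 h0]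
        simp [hb]
        ring_nf
    · have hb : pvVow ch = false := by simp [pvVow, hv]
      by_cases h3 : (r + 1 : Int) == 3
      · constructor
        · simp [pvWordLoopA, pvRun3, hv, hb, h3]
        · intro h0
          simp [pvRun3, hb, h3] at h0
      · constructor
        · simp only [pvWordLoopA, pvRun3, hv, hb, h3, if_false, Bool.false_eq_true]
          exact (ih (c + 1) v (r + 1)).1
        · intro h0
          simp only [pvRun3, hb, h3, if_false, Bool.false_eq_true] at h0
          simp only [pvWordLoopA, hv, h3, if_false, Bool.false_eq_true]
          rw [(ih (c + 1) v (r + 1)).2 h0]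
          simp [hb]
          ring_nf

-- the per-word decisions of the two programs
def pvHardA (w : String) : Bool :=
  let r := pvWordLoopA w.toList 0 0 0
  r.2.2 || decide (r.1 > r.2.1)

def pvHardB (w : String) : Bool :=
  let cs := w.toList
  let v : Int := (cs.map (fun ch => if ch ∈ pvVowelsB then (1 : Int) else 0)).sum
  decide ((PySem.Str.len w : Int) - v > v) ||
    (cs.zip ((PySem.List.slice cs (some 1) none).zip (PySem.List.slice cs (some 2) none))).any
      (fun t => !decide (t.1 ∈ pvVowelsB) && !decide (t.2.1 ∈ pvVowelsB) && !decide (t.2.2 ∈ pvVowelsB))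

theorem pvVowelsB_eq : pvVowelsB = pvVowelsA := by decide

theorem pvHard_eq (w : String) : pvHardA w = pvHardB w := by
  unfold pvHardA pvHardB
  have hslice1 : PySem.List.slice w.toList (some 1) none = w.toList.drop 1 :=
    PySem.List.slice_from w.toList (by norm_num)
  have hslice2 : PySem.List.slice w.toList (some 2) none = w.toList.drop 2 :=
    PySem.List.slice_from w.toList (by norm_num)
  have hv : ((w.toList.map (fun ch => if ch ∈ pvVowelsB then (1 : Int) else 0)).sum)
      = (w.toList.countP pvVow : Int) := by
    rw [pvVowelsB_eq]
    have hfun : (fun ch => if ch ∈ pvVowelsA then (1 : Int) else 0)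
        = fun ch => if pvVow ch = true then (1 : Int) else 0 := by
      funext ch; simp [pvVow]
    rw [hfun, PySem.List.sum_map_ite_one_zero]
  have hz : ((w.toList.zip ((PySem.List.slice w.toList (some 1) none).zip
        (PySem.List.slice w.toList (some 2) none))).any
      (fun t => !decide (t.1 ∈ pvVowelsB) && !decide (t.2.1 ∈ pvVowelsB) && !decide (t.2.2 ∈ pvVowelsB)))
      = pvZ3 w.toList := by
    rw [hslice1, hslice2, pvVowelsB_eq]
    simp [pvZ3, pvVow]
  have hlen : (PySem.Str.len w : Int) = (w.toList.length : Int) := by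
    simp [PySem.Str.len_eq]
  have hcount : w.toList.length = w.toList.countP pvVow + w.toList.countP (fun ch => !pvVow ch) := by
    have h0 := List.length_eq_countP_add_countP (p := pvVow) (l := w.toList)
    simpa using h0
  simp only [hv, hz, hlen]
  obtain ⟨_, _, h0⟩ := pvRun3_eq w.toList
  obtain ⟨hflag, hcounts⟩ := pvWordLoopA_char w.toList 0 0 0
  cases hr : pvRun3 w.toList 0
  · rw [hcounts hr]
    rw [← h0, hr]
    simp only [Bool.false_or, Bool.or_false, gt_iff_lt, decide_eq_decide]
    constructor <;> intro hx <;> omega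
  · rw [← h0, hr]
    simp [hflag, hr]

theorem pv_fold_eq (ws : List String) : ∀ (h e : Int),
    5 * (ws.foldl pvStepA (h, e)).1 - 2 * (ws.foldl pvStepA (h, e)).2
      = ws.foldl pvStepB (5 * h - 2 * e) := by
  induction ws with
  | nil => intro h e; simp
  | cons w ws ih =>
    intro h e
    have hw : pvHardA w = pvHardB w := pvHard_eq w
    simp only [List.foldl_cons]
    have hA : pvStepA (h, e) w = if pvHardA w then (h + 1, e) else (h, e + 1) := by
      unfold pvStepA pvHardA; rfl
    have hB : pvStepB (5 * h - 2 * e) w = 5 * h - 2 * e + (if pvHardB w then 5 else -2) := by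
      unfold pvStepB pvHardB; rfl
    rw [hA, hB, ← hw]
    cases hh : pvHardA w
    · simp only [if_false, Bool.false_eq_true]
      rw [ih h (e + 1)]
      congr 1; ring
    · simp only [if_true]
      rw [ih (h + 1) e]
      congr 1; ring

theorem pv_split_empty (str : String) (h : str.toList = []) : PySem.Str.split₀ str = [] := by
  rw [String.toList_eq_nil_iff.mp h]
  decide

-- ===== VERDICT (by name: the statement is the Claim_ definition above) =====
theorem Difficulty_spec : Claim_equal_Difficulty := by
  intro str _
  unfold Spec_Difficulty Difficulty Difficulty_alt
  by_cases h : str.toList.isEmpty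
  · rw [if_pos h]
    rw [pv_split_empty str (by simpa [List.isEmpty_iff] using h)]
    rfl
  · rw [if_neg h]
    have := pv_fold_eq (PySem.Str.split₀ str) 0 0
    simpa using this
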